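-- pv_equiv track=rewrite | github.com/Zaki-1052/Yeast_MSA | scripts/genomic_context_analysis.py | detect_repeat
-- ===== SOURCE A (Python) =====
-- def detect_repeat(sequence, variant_index, repeat_size=2, window=20, min_repeats=2):
--     """Detect repeats near the variant position."""
--     # Extract region around variant
--     start = max(0, variant_index - window)
--     end = min(len(sequence), variant_index + window + 1)
--     region = sequence[start:end]
--
--     # Search for repeats
--     for i in range(len(region) - repeat_size * min_repeats + 1):
--         repeat_unit = region[i:i+repeat_size]
--         # Check if this unit is repeated
--         is_repeat = True
--         for j in range(1, min_repeats):
--             next_unit = region[i + j*repeat_size:i + (j+1)*repeat_size]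
--             if next_unit != repeat_unit:
--                 is_repeat = False
--                 break
--         if is_repeat:
--             return True
--
--     return False
-- ===== SOURCE B (Python) =====
-- def detect_repeat(sequence, variant_index, repeat_size=2, window=20, min_repeats=2):
--     """Detect repeats near the variant position (single linear scan over match-run lengths)."""
--     start = max(0, variant_index - window)
--     end = min(len(sequence), variant_index + window + 1)
--     region = sequence[start:end]
--     L = len(region)
--     limit = L - repeat_size * min_repeats  # largest admissible start of a repeat block
--     if limit < 0:
--         return False
--     if repeat_size <= 0 or min_repeats <= 1:
--         return True  # degenerate parameters: the repeat condition is vacuous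
--     need = (min_repeats - 1) * repeat_size  # matches region[k]==region[k+repeat_size] needed
--     run = 0
--     for k in range(L - repeat_size):
--         run = run + 1 if region[k] == region[k + repeat_size] else 0
--         if run >= need and k + 1 - need <= limit:
--             return True
--     return False
-- ===== Notes on version B (the rewrite author's own statement) =====
-- stated objective: alternative
-- what changed: A slides a start index over the region and re-compares every repeat unit against the first unit with nested slice comparisons; B makes one linear pass over the region counting run lengths of the pointwise periodicity test region[k]==region[k+repeat_size] and reports success when a run long enough ends at a position whose window start is admissible.
import Mathlib
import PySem

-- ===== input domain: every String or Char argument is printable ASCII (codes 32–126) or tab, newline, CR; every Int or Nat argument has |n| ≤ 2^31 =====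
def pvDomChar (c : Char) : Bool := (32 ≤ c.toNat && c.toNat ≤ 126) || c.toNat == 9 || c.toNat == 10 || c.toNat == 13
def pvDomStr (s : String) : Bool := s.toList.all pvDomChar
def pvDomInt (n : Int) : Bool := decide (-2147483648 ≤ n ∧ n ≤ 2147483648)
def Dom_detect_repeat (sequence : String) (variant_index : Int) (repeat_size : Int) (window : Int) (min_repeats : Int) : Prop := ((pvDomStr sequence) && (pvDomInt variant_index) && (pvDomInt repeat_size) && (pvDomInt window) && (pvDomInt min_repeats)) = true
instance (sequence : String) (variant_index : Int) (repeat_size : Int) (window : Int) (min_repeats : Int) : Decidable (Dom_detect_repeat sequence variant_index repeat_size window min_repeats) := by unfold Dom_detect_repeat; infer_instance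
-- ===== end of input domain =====

-- B replaces A's nested slice-comparison scan by one linear pass counting run lengths of
-- the pointwise periodicity test region[k] == region[k + repeat_size] (objective: alternative algorithm).

-- ===== PORT A =====
-- the inner 'for j in range(1, min_repeats)' loop with its break (early False)
def detectRepeatInner (region : List Char) (i r m : Int) (repeat_unit : List Char) (j : Int) : Bool :=
  if _h : j < m then
    if PySem.List.slice region (some (i + j * r)) (some (i + (j + 1) * r)) = repeat_unit then
      detectRepeatInner region i r m repeat_unit (j + 1)
    else false
  else true
termination_by (m - j).toNat
decreasing_by omega

-- the outer 'for i in range(...)' loop with its early 'return True'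
def detectRepeatOuter (region : List Char) (r m bound i : Int) : Bool :=
  if _h : i < bound then
    if detectRepeatInner region i r m (PySem.List.slice region (some i) (some (i + r))) 1 then true
    else detectRepeatOuter region r m bound (i + 1)
  else false
termination_by (bound - i).toNat
decreasing_by omega

def detect_repeat (sequence : String) (variant_index : Int) (repeat_size : Int) (window : Int) (min_repeats : Int) : Bool :=
  let cs := sequence.toList
  let start := max 0 (variant_index - window)
  let stop := min ((cs.length : Int)) (variant_index + window + 1)
  let region := PySem.List.slice cs (some start) (some stop)
  detectRepeatOuter region repeat_size min_repeats ((region.length : Int) - repeat_size * min_repeats + 1) 0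

-- ===== PORT B =====
-- the for-loop of Source B with its `run` accumulator and early return
def detectRepeatRun (region : List Char) (r need limit : Int) : List Int → Int → Bool
  | [], _ => false
  | k :: ks, run =>
    let run' := if PySem.List.pyGet? region k = PySem.List.pyGet? region (k + r) then run + 1 else 0
    if need ≤ run' ∧ k + 1 - need ≤ limit then true
    else detectRepeatRun region r need limit ks run'

def detect_repeat_alt (sequence : String) (variant_index : Int) (repeat_size : Int) (window : Int) (min_repeats : Int) : Bool :=
  let cs := sequence.toList
  let start := max 0 (variant_index - window)
  let stop := min ((cs.length : Int)) (variant_index + window + 1)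
  let region := PySem.List.slice cs (some start) (some stop)
  let L : Int := region.length
  let limit := L - repeat_size * min_repeats
  if limit < 0 then false
  else if repeat_size ≤ 0 ∨ min_repeats ≤ 1 then true
  else
    detectRepeatRun region repeat_size ((min_repeats - 1) * repeat_size) limit
      (PySem.List.pyRange 0 (L - repeat_size) 1) 0

-- ===== PRECONDITION & SPEC =====
def Spec_detect_repeat (sequence : String) (variant_index : Int) (repeat_size : Int) (window : Int) (min_repeats : Int) (out : Bool) : Prop := out = detect_repeat_alt sequence variant_index repeat_size window min_repeats
instance (sequence : String) (variant_index : Int) (repeat_size : Int) (window : Int) (min_repeats : Int) (out : Bool) : Decidable (Spec_detect_repeat sequence variant_index repeat_size window min_repeats out) := by unfold Spec_detect_repeat; infer_instance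

-- ===== CLAIM (what is proved, stated in full; the proofs are below) =====
def Claim_equal_detect_repeat : Prop := ∀ (sequence : String) (variant_index : Int) (repeat_size : Int) (window : Int) (min_repeats : Int), Dom_detect_repeat sequence variant_index repeat_size window min_repeats → Spec_detect_repeat sequence variant_index repeat_size window min_repeats (detect_repeat sequence variant_index repeat_size window min_repeats)

-- ===== LEMMAS AND PROOFS =====

-- length of the consecutive stretch of positions t with xs[t]? = xs[t+rn]? ending just before k
def pvStreak (xs : List Char) (rn : ℕ) : ℕ → ℕ
  | 0 => 0
  | k + 1 => if xs[k]? = xs[k + rn]? then pvStreak xs rn k + 1 else 0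

theorem pvStreak_le (xs : List Char) (rn k : ℕ) : pvStreak xs rn k ≤ k := by
  induction k with
  | zero => simp [pvStreak]
  | succ k ih => simp only [pvStreak]; split <;> omega

theorem pvStreak_match (xs : List Char) (rn k : ℕ) :
    ∀ t, k - pvStreak xs rn k ≤ t → t < k → xs[t]? = xs[t + rn]? := by
  induction k with
  | zero => omega
  | succ k ih =>
    intro t h1 h2
    by_cases hm : xs[k]? = xs[k + rn]?
    · simp only [pvStreak, if_pos hm] at h1
      rcases Nat.lt_or_ge t k with h | h
      · exact ih t (by have := pvStreak_le xs rn k; omega) h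
      · have : t = k := by omega
        subst this; exact hm
    · simp only [pvStreak, if_neg hm] at h1
      omega

theorem pvStreak_ge (xs : List Char) (rn a b : ℕ)
    (h : ∀ t, a ≤ t → t < b → xs[t]? = xs[t + rn]?) : b - a ≤ pvStreak xs rn b := by
  induction b with
  | zero => omega
  | succ b ih =>
    rcases Nat.lt_or_ge b a with hb | hb
    · omega
    · have hm : xs[b]? = xs[b + rn]? := h b hb (by omega)
      have := ih (fun t h1 h2 => h t h1 (by omega))
      simp only [pvStreak, if_pos hm]
      omega

-- the loop of Source B, started at index kn with the exact streak as accumulator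
theorem pvRun_aux (xs : List Char) (rn needn limitn : ℕ) (e : Int) (d : ℕ) :
    ∀ kn : ℕ, (e - (kn : Int)).toNat ≤ d →
    ((detectRepeatRun xs (rn : Int) (needn : Int) (limitn : Int)
        (PySem.List.pyRange (kn : Int) e 1) ((pvStreak xs rn kn : ℕ) : Int) = true) ↔
    ∃ k : ℕ, kn ≤ k ∧ (k : Int) < e ∧ needn ≤ pvStreak xs rn (k + 1) ∧
      (k : Int) + 1 - (needn : Int) ≤ (limitn : Int)) := by
  induction d with
  | zero =>
    intro kn hd
    have he : e ≤ (kn : Int) := by omega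
    rw [PySem.List.pyRange_one_eq_nil he]
    simp only [detectRepeatRun]
    constructor
    · intro h; exact absurd h (by simp)
    · rintro ⟨k, hk1, hk2, -⟩
      exfalso
      have : (kn : Int) ≤ (k : Int) := by exact_mod_cast hk1
      omega
  | succ d ih =>
    intro kn hd
    by_cases he : e ≤ (kn : Int)
    · rw [PySem.List.pyRange_one_eq_nil he]
      simp only [detectRepeatRun]
      constructor
      · intro h; exact absurd h (by simp)
      · rintro ⟨k, hk1, hk2, -⟩
        exfalso
        have : (kn : Int) ≤ (k : Int) := by exact_mod_cast hk1
        omega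
    · push_neg at he
      rw [PySem.List.pyRange_one_cons he]
      simp only [detectRepeatRun]
      have hget1 : PySem.List.pyGet? xs ((kn : Int)) = xs[kn]? := PySem.List.pyGet?_natCast xs kn
      have hget2 : PySem.List.pyGet? xs ((kn : Int) + (rn : Int)) = xs[kn + rn]? := by
        have hcc : ((kn : Int) + (rn : Int)) = ((kn + rn : ℕ) : Int) := by push_cast; ring
        rw [hcc]; exact PySem.List.pyGet?_natCast xs (kn + rn)
      have hrun : (if PySem.List.pyGet? xs ((kn : Int)) = PySem.List.pyGet? xs ((kn : Int) + (rn : Int))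
          then ((pvStreak xs rn kn : ℕ) : Int) + 1 else 0) = ((pvStreak xs rn (kn + 1) : ℕ) : Int) := by
        rw [hget1, hget2]
        by_cases hm : xs[kn]? = xs[kn + rn]?
        · rw [if_pos hm]; simp only [pvStreak, if_pos hm]; push_cast; ring
        · rw [if_neg hm]; simp only [pvStreak, if_neg hm]; simp
      rw [hrun]
      by_cases hchk : (needn : Int) ≤ ((pvStreak xs rn (kn + 1) : ℕ) : Int) ∧
          (kn : Int) + 1 - (needn : Int) ≤ (limitn : Int)
      · rw [if_pos hchk]
        simp only [true_iff]
        exact ⟨kn, le_refl _, he, by exact_mod_cast hchk.1, hchk.2⟩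
      · rw [if_neg hchk]
        have hcast : ((kn : Int) + 1) = ((kn + 1 : ℕ) : Int) := by push_cast; ring
        rw [hcast]
        rw [ih (kn + 1) (by omega)]
        constructor
        · rintro ⟨k, hk1, hk2, hk3, hk4⟩
          exact ⟨k, by omega, hk2, hk3, hk4⟩
        · rintro ⟨k, hk1, hk2, hk3, hk4⟩
          rcases Nat.lt_or_ge kn k with h | h
          · exact ⟨k, by omega, hk2, hk3, hk4⟩
          · have hkk : k = kn := by omega
            subst hkk
            exact absurd ⟨by exact_mod_cast hk3, hk4⟩ hchk

-- full slices of equal width are equal iff they agree pointwise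
theorem pvUnit_eq_iff (xs : List Char) (a b rn : ℕ) :
    (xs.drop a).take rn = (xs.drop b).take rn ↔ ∀ t, t < rn → xs[a + t]? = xs[b + t]? := by
  rw [List.ext_getElem?_iff]
  constructor
  · intro h t ht
    have := h t
    simpa [List.getElem?_take, List.getElem?_drop, ht] using this
  · intro h t
    simp only [List.getElem?_take, List.getElem?_drop]
    split_ifs with ht
    · exact h t ht
    · rfl

-- every unit equal to the first unit ⟺ period rn over the whole block
theorem pvUnits_iff_period (xs : List Char) (i rn mn : ℕ) (hr : 1 ≤ rn) :
    (∀ j, j < mn - 1 → ∀ t, t < rn → xs[i + (1 + j) * rn + t]? = xs[i + t]?) ↔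
    (∀ t, t < (mn - 1) * rn → xs[i + t]? = xs[i + t + rn]?) := by
  constructor
  · intro h t ht
    have u : ∀ j, j ≤ mn - 1 → ∀ s, s < rn → xs[i + j * rn + s]? = xs[i + s]? := by
      intro j hj s hs
      rcases Nat.eq_zero_or_pos j with hj0 | hj0
      · subst hj0; simp
      · obtain ⟨j', rfl⟩ : ∃ j', j = 1 + j' := ⟨j - 1, by omega⟩
        exact h j' (by omega) s hs
    have hdm : t / rn * rn + t % rn = t := by
      have := Nat.div_add_mod t rn
      have hc := Nat.mul_comm rn (t / rn)
      omega
    have hs : t % rn < rn := Nat.mod_lt _ (by omega)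
    have hq : t / rn < mn - 1 := by
      rw [Nat.div_lt_iff_lt_mul (by omega : 0 < rn)]
      omega
    have e1 : i + t = i + t / rn * rn + t % rn := by omega
    rw [e1]
    have e2 : i + t / rn * rn + t % rn + rn = i + (t / rn + 1) * rn + t % rn := by
      have : (t / rn + 1) * rn = t / rn * rn + rn := by ring
      omega
    rw [e2, u (t / rn) (by omega) (t % rn) hs, u (t / rn + 1) (by omega) (t % rn) hs]
  · intro h
    have u : ∀ j, j ≤ mn - 1 → ∀ s, s < rn → xs[i + j * rn + s]? = xs[i + s]? := by
      intro j
      induction j with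
      | zero => intro _ s _; simp
      | succ j ihj =>
        intro hj s hs
        have e1 : i + (j + 1) * rn + s = i + (j * rn + s) + rn := by
          have : (j + 1) * rn = j * rn + rn := by ring
          omega
        have hk : j * rn + s < (mn - 1) * rn := by
          have h1 : (j + 1) * rn = j * rn + rn := by ring
          have h2 : (j + 1) * rn ≤ (mn - 1) * rn := Nat.mul_le_mul_right _ (by omega)
          omega
        have hper := h (j * rn + s) hk
        have e2 : i + (j * rn + s) = i + j * rn + s := by omega
        rw [e1, ← hper, e2, ihj (by omega) s hs]
    intro j hj s hs
    exact u (1 + j) (by omega) s hs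

-- a Python slice whose stop is nonnegative and at most its (larger) start is empty
theorem pvSlice_nil (xs : List Char) (a b : Int) (h0 : 0 ≤ b) (h : b ≤ a) :
    PySem.List.slice xs (some a) (some b) = ([] : List Char) := by
  simp only [PySem.List.slice, PySem.List.clampIdx]
  rw [if_neg (by omega), if_neg (by omega)]
  rw [List.take_eq_nil_iff]
  left
  have : b.toNat ≤ a.toNat := by omega
  simp only [Nat.min_def]
  split_ifs <;> omega

-- shape of A's j-th unit slice, for a start i and a unit index j ≥ 1
theorem pvSliceJ (xs : List Char) (i rn : ℕ) (j : Int) (hj : 1 ≤ j) :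
    PySem.List.slice xs (some ((i : Int) + j * (rn : Int))) (some ((i : Int) + (j + 1) * (rn : Int)))
      = (xs.drop (i + j.toNat * rn)).take rn := by
  have hjj : (j.toNat : Int) = j := Int.toNat_of_nonneg (by omega)
  have h1 : ((i : Int) + j * (rn : Int)) = ((i + j.toNat * rn : ℕ) : Int) := by
    push_cast [hjj]; ring
  have h2 : ((i : Int) + (j + 1) * (rn : Int)) = ((i + j.toNat * rn + rn : ℕ) : Int) := by
    push_cast [hjj]; ring
  rw [h1, h2, PySem.List.slice_natCast]
  congr 1
  omega

-- shape of A's first unit slice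
theorem pvSlice0 (xs : List Char) (i rn : ℕ) :
    PySem.List.slice xs (some (i : Int)) (some ((i : Int) + (rn : Int))) = (xs.drop i).take rn := by
  have h2 : ((i : Int) + (rn : Int)) = ((i + rn : ℕ) : Int) := by push_cast; ring
  rw [h2, PySem.List.slice_natCast]
  congr 1
  omega

-- A's inner loop at start i succeeds iff the block starting at i has period rn
theorem pvInner_iff (xs : List Char) (i rn mn : ℕ) (hr : 1 ≤ rn) (hm : 2 ≤ mn) :
    ((PySem.List.pyRange 1 (mn : Int) 1).all (fun j =>
        decide (PySem.List.slice xs (some ((i : Int) + j * (rn : Int)))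
          (some ((i : Int) + (j + 1) * (rn : Int))) =
          PySem.List.slice xs (some (i : Int)) (some ((i : Int) + (rn : Int))))) = true) ↔
    (∀ t, t < (mn - 1) * rn → xs[i + t]? = xs[i + t + rn]?) := by
  rw [List.all_eq_true, ← pvUnits_iff_period xs i rn mn hr]
  constructor
  · intro h j hj t ht
    have hmem : ((1 + j : ℕ) : Int) ∈ PySem.List.pyRange 1 (mn : Int) 1 := by
      rw [PySem.List.mem_pyRange_one]
      constructor
      · push_cast; omega
      · push_cast; omega
    have hh := h _ hmem
    rw [decide_eq_true_iff, pvSliceJ xs i rn _ (by push_cast; omega), pvSlice0] at hh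
    have htn : ((1 + j : ℕ) : Int).toNat = 1 + j := by omega
    rw [htn] at hh
    exact (pvUnit_eq_iff xs (i + (1 + j) * rn) i rn).mp hh t ht
  · intro h j hjmem
    rw [PySem.List.mem_pyRange_one] at hjmem
    rw [decide_eq_true_iff, pvSliceJ xs i rn j hjmem.1, pvSlice0]
    apply (pvUnit_eq_iff xs (i + j.toNat * rn) i rn).mpr
    obtain ⟨j', hj'⟩ : ∃ j', j.toNat = 1 + j' := ⟨j.toNat - 1, by omega⟩
    have hj'lt : j' < mn - 1 := by
      have : j < (mn : Int) := hjmem.2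
      omega
    rw [hj']
    exact h j' hj'lt

-- A's search succeeds iff some admissible start has period rn over its block
theorem pvA_iff (xs : List Char) (rn mn : ℕ) (hr : 1 ≤ rn) (hm : 2 ≤ mn)
    (hn : rn * mn ≤ xs.length) :
    ((PySem.List.pyRange 0 ((xs.length : Int) - (rn : Int) * (mn : Int) + 1) 1).any (fun i =>
      let repeat_unit := PySem.List.slice xs (some i) (some (i + (rn : Int)))
      (PySem.List.pyRange 1 (mn : Int) 1).all (fun j =>
        decide (PySem.List.slice xs (some (i + j * (rn : Int)))
          (some (i + (j + 1) * (rn : Int))) = repeat_unit))) = true) ↔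
    ∃ i : ℕ, i ≤ xs.length - rn * mn ∧
      ∀ t, t < (mn - 1) * rn → xs[i + t]? = xs[i + t + rn]? := by
  have hcast : ((rn * mn : ℕ) : Int) = (rn : Int) * (mn : Int) := by push_cast; ring
  rw [List.any_eq_true]
  constructor
  · rintro ⟨iv, hmem, hin⟩
    rw [PySem.List.mem_pyRange_one] at hmem
    have hic : ((iv.toNat : ℕ) : Int) = iv := Int.toNat_of_nonneg hmem.1
    refine ⟨iv.toNat, by omega, ?_⟩
    apply (pvInner_iff xs iv.toNat rn mn hr hm).mp
    have hin2 : ((PySem.List.pyRange 1 (mn : Int) 1).all (fun j =>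
        decide (PySem.List.slice xs (some (iv + j * (rn : Int)))
          (some (iv + (j + 1) * (rn : Int))) =
          PySem.List.slice xs (some iv) (some (iv + (rn : Int))))) = true) := hin
    rw [← hic] at hin2
    exact hin2
  · rintro ⟨i, hle, hper⟩
    refine ⟨(i : Int), ?_, ?_⟩
    · rw [PySem.List.mem_pyRange_one]
      constructor
      · omega
      · omega
    · exact (pvInner_iff xs i rn mn hr hm).mpr hper

-- the two loop phrasings agree for every region and parameter pair
theorem pvCore (region : List Char) (r m : Int) :
    ((PySem.List.pyRange 0 ((region.length : Int) - r * m + 1) 1).any (fun i =>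
      let repeat_unit := PySem.List.slice region (some i) (some (i + r))
      (PySem.List.pyRange 1 m 1).all (fun j =>
        decide (PySem.List.slice region (some (i + j * r)) (some (i + (j + 1) * r)) = repeat_unit)))) =
    (let L : Int := region.length
     let limit := L - r * m
     if limit < 0 then false
     else if r ≤ 0 ∨ m ≤ 1 then true
     else detectRepeatRun region r ((m - 1) * r) limit (PySem.List.pyRange 0 (L - r) 1) 0) := by
  by_cases h1 : (region.length : Int) - r * m < 0
  · rw [PySem.List.pyRange_one_eq_nil (by omega)]
    simp [h1]
  · push_neg at h1
    by_cases h2 : r ≤ 0 ∨ m ≤ 1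
    · have hRHS : (let L : Int := region.length
        let limit := L - r * m
        if limit < 0 then false
        else if r ≤ 0 ∨ m ≤ 1 then true
        else detectRepeatRun region r ((m - 1) * r) limit (PySem.List.pyRange 0 (L - r) 1) 0) = true := by
        simp [not_lt.mpr h1, h2]
      rw [hRHS]
      rw [List.any_eq_true]
      refine ⟨(region.length : Int) - r * m, ?_, ?_⟩
      · rw [PySem.List.mem_pyRange_one]; omega
      · rw [List.all_eq_true]
        intro j hjmem
        rw [PySem.List.mem_pyRange_one] at hjmem
        rcases h2 with h2r | h2m
        · -- r ≤ 0 : every slice involved is empty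
          have hL : (0 : Int) ≤ (region.length : Int) := Int.natCast_nonneg _
          rw [decide_eq_true_iff]
          have hnil0 : PySem.List.slice region (some ((region.length : Int) - r * m))
              (some (((region.length : Int) - r * m) + r)) = ([] : List Char) := by
            apply pvSlice_nil _ _ _ ?_ (by omega)
            have e : (m - 1) * (-r) = ((region.length : Int) - r * m) + r - (region.length : Int) := by
              ring
            have hp : 0 ≤ (m - 1) * (-r) := Int.mul_nonneg (by omega) (by omega)
            omega
          have hnilj : PySem.List.slice region (some (((region.length : Int) - r * m) + j * r))
              (some (((region.length : Int) - r * m) + (j + 1) * r)) = ([] : List Char) := by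
            have ejr : (j + 1) * r = j * r + r := by ring
            apply pvSlice_nil _ _ _ ?_ (by omega)
            have e : (m - (j + 1)) * (-r) =
                (((region.length : Int) - r * m) + (j + 1) * r) - (region.length : Int) := by
              ring
            have hp : 0 ≤ (m - (j + 1)) * (-r) := Int.mul_nonneg (by omega) (by omega)
            omega
          rw [hnil0, hnilj]
        · omega
    · push_neg at h2
      have hr1 : 1 ≤ r := by omega
      have hm2 : 2 ≤ m := by omega
      lift r to ℕ using (by omega) with rn
      lift m to ℕ using (by omega) with mn
      have hrn : 1 ≤ rn := by exact_mod_cast hr1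
      have hmn : 2 ≤ mn := by exact_mod_cast hm2
      have hcast : ((rn * mn : ℕ) : Int) = (rn : Int) * (mn : Int) := by push_cast; ring
      have hn : rn * mn ≤ region.length := by omega
      have hneed1 : 1 ≤ (mn - 1) * rn := by
        have := Nat.mul_le_mul (by omega : 1 ≤ mn - 1) (by omega : 1 ≤ rn)
        omega
      have hmul : (mn - 1) * rn + rn = rn * mn := by
        rw [Nat.sub_one_mul]
        have ha : rn ≤ mn * rn := Nat.le_mul_of_pos_left _ (by omega)
        have hb : mn * rn = rn * mn := Nat.mul_comm _ _
        omega
      have hRHS : (let L : Int := region.length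
        let limit := L - (rn : Int) * (mn : Int)
        if limit < 0 then false
        else if (rn : Int) ≤ 0 ∨ (mn : Int) ≤ 1 then true
        else detectRepeatRun region (rn : Int) (((mn : Int) - 1) * (rn : Int)) limit
          (PySem.List.pyRange 0 (L - (rn : Int)) 1) 0) =
        detectRepeatRun region (rn : Int) (((mn : Int) - 1) * (rn : Int))
          ((region.length : Int) - (rn : Int) * (mn : Int))
          (PySem.List.pyRange 0 ((region.length : Int) - (rn : Int)) 1) 0 := by
        rw [if_neg (by omega), if_neg (by omega)]
      rw [hRHS]
      have hneedc : (((mn - 1) * rn : ℕ) : Int) = ((mn : Int) - 1) * (rn : Int) := by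
        push_cast [Nat.cast_sub (by omega : 1 ≤ mn)]
        ring
      have hlimc : (((region.length - rn * mn : ℕ)) : Int) =
          (region.length : Int) - (rn : Int) * (mn : Int) := by
        push_cast [Nat.cast_sub hn]
        ring
      have hB := pvRun_aux region rn ((mn - 1) * rn) (region.length - rn * mn)
        ((region.length : Int) - (rn : Int)) (((region.length : Int) - (rn : Int)).toNat) 0
        (by simp)
      rw [show pvStreak region rn 0 = 0 from rfl] at hB
      simp only [Nat.cast_zero] at hB
      rw [hneedc, hlimc] at hB
      apply Bool.coe_iff_coe.mp
      rw [hB, pvA_iff region rn mn hrn hmn hn]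
      constructor
      · rintro ⟨i, hi, hper⟩
        refine ⟨i + (mn - 1) * rn - 1, by omega, by omega, ?_, by omega⟩
        have hk1 : i + (mn - 1) * rn - 1 + 1 = i + (mn - 1) * rn := by omega
        rw [hk1]
        have := pvStreak_ge region rn i (i + (mn - 1) * rn) ?_
        · omega
        · intro t ht1 ht2
          have hp := hper (t - i) (by omega)
          have e1 : i + (t - i) = t := by omega
          rw [e1] at hp
          exact hp
      · rintro ⟨k, -, hk2, hk3, hk4⟩
        have hsl := pvStreak_le region rn (k + 1)
        refine ⟨k + 1 - (mn - 1) * rn, by omega, ?_⟩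
        intro t ht
        have := pvStreak_match region rn (k + 1) (k + 1 - (mn - 1) * rn + t) (by omega) (by omega)
        exact this

-- the inner loop equals an 'all' over its index range
theorem pvInner_eq_all (region : List Char) (i r m : Int) (ru : List Char) (d : ℕ) :
    ∀ j : Int, (m - j).toNat ≤ d →
    detectRepeatInner region i r m ru j =
      (PySem.List.pyRange j m 1).all (fun jj =>
        decide (PySem.List.slice region (some (i + jj * r)) (some (i + (jj + 1) * r)) = ru)) := by
  induction d with
  | zero =>
    intro j hj
    rw [PySem.List.pyRange_one_eq_nil (by omega), detectRepeatInner]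
    rw [dif_neg (by omega)]
    simp
  | succ d ih =>
    intro j hj
    by_cases hjm : j < m
    · rw [PySem.List.pyRange_one_cons hjm, detectRepeatInner, dif_pos hjm]
      simp only [List.all_cons]
      by_cases hs : PySem.List.slice region (some (i + j * r)) (some (i + (j + 1) * r)) = ru
      · rw [if_pos hs, ih (j + 1) (by omega)]
        simp [hs]
      · rw [if_neg hs]
        simp [hs]
    · rw [PySem.List.pyRange_one_eq_nil (by omega), detectRepeatInner, dif_neg hjm]
      simp

-- the outer loop equals an 'any' over its index range
theorem pvOuter_eq_any (region : List Char) (r m bound : Int) (d : ℕ) :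
    ∀ i : Int, (bound - i).toNat ≤ d →
    detectRepeatOuter region r m bound i =
      (PySem.List.pyRange i bound 1).any (fun ii =>
        detectRepeatInner region ii r m
          (PySem.List.slice region (some ii) (some (ii + r))) 1) := by
  induction d with
  | zero =>
    intro i hi
    rw [PySem.List.pyRange_one_eq_nil (by omega), detectRepeatOuter]
    rw [dif_neg (by omega)]
    simp
  | succ d ih =>
    intro i hi
    by_cases him : i < bound
    · rw [PySem.List.pyRange_one_cons him, detectRepeatOuter, dif_pos him]
      simp only [List.any_cons]
      by_cases hin : detectRepeatInner region i r m
          (PySem.List.slice region (some i) (some (i + r))) 1 = true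
      · rw [if_pos hin]
        simp [hin]
      · rw [if_neg hin]
        rw [ih (i + 1) (by omega)]
        simp only [Bool.not_eq_true] at hin
        simp [hin]
    · rw [PySem.List.pyRange_one_eq_nil (by omega), detectRepeatOuter, dif_neg him]
      simp

-- ===== VERDICT (by name: the statement is the Claim_ definition above) =====
theorem detect_repeat_spec : Claim_equal_detect_repeat := by
  intro sequence variant_index repeat_size window min_repeats _
  unfold Spec_detect_repeat detect_repeat detect_repeat_alt
  rw [pvOuter_eq_any _ repeat_size min_repeats _
    ((((PySem.List.slice sequence.toList (some (max 0 (variant_index - window)))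
      (some (min ((sequence.toList.length : Int)) (variant_index + window + 1)))).length : Int)
      - repeat_size * min_repeats + 1) - 0).toNat 0 (le_refl _)]
  have hfun : (fun ii => detectRepeatInner
      (PySem.List.slice sequence.toList (some (max 0 (variant_index - window)))
        (some (min ((sequence.toList.length : Int)) (variant_index + window + 1)))) ii
      repeat_size min_repeats
      (PySem.List.slice
        (PySem.List.slice sequence.toList (some (max 0 (variant_index - window)))
          (some (min ((sequence.toList.length : Int)) (variant_index + window + 1))))
        (some ii) (some (ii + repeat_size))) 1) =
      (fun ii => (PySem.List.pyRange 1 min_repeats 1).all (fun jj =>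
        decide (PySem.List.slice
          (PySem.List.slice sequence.toList (some (max 0 (variant_index - window)))
            (some (min ((sequence.toList.length : Int)) (variant_index + window + 1))))
          (some (ii + jj * repeat_size)) (some (ii + (jj + 1) * repeat_size)) =
          PySem.List.slice
            (PySem.List.slice sequence.toList (some (max 0 (variant_index - window)))
              (some (min ((sequence.toList.length : Int)) (variant_index + window + 1))))
            (some ii) (some (ii + repeat_size))))) := by
    funext ii
    exact pvInner_eq_all _ ii repeat_size min_repeats _ ((min_repeats - 1).toNat) 1 (by omega)
  rw [hfun]
  exact pvCore _ repeat_size min_repeats
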